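-- pv_equiv track=rewrite | github.com/Hmbown/ZMLX | src/zmlx/kd/tour.py | interleave_tours
-- ===== SOURCE A (Python) =====
-- def interleave_tours(tours: list[list[int]]) -> list[int]:
--     """Interleave multiple tours into a single visitation sequence."""
--     if not tours:
--         return []
--     max_len = max(len(t) for t in tours)
--     out: list[int] = []
--     seen: set[int] = set()
--     for pos in range(max_len):
--         for tour in tours:
--             if pos >= len(tour):
--                 continue
--             idx = tour[pos]
--             if idx in seen:
--                 continue
--             seen.add(idx)
--             out.append(idx)
--     return out
-- ===== SOURCE B (Python) =====
-- def interleave_tours(tours: list[list[int]]) -> list[int]: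
--     """Interleave multiple tours into a single visitation sequence."""
--     # Flatten the grid row-major into coordinate cells, sort by (position,
--     # tour index) to obtain the interleaved order, then dedup keeping the
--     # first occurrence of each node.
--     cells = [(pos, ti, idx)
--              for ti, tour in enumerate(tours)
--              for pos, idx in enumerate(tour)]
--     cells.sort(key=lambda c: (c[0], c[1]))
--     return list(dict.fromkeys(idx for _, _, idx in cells))
-- ===== Notes on version B (the rewrite author's own statement) =====
-- stated objective: alternative
-- what changed: A fuses interleaving and dedup in a nested position-by-tour index loop with a seen-set; B flattens the tours row-major into (pos, tour_index, value) cells, sorts the cells by (pos, tour_index), and dedups the sorted value stream with dict.fromkeys — sort-then-scan instead of nested scans.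
import Mathlib
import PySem

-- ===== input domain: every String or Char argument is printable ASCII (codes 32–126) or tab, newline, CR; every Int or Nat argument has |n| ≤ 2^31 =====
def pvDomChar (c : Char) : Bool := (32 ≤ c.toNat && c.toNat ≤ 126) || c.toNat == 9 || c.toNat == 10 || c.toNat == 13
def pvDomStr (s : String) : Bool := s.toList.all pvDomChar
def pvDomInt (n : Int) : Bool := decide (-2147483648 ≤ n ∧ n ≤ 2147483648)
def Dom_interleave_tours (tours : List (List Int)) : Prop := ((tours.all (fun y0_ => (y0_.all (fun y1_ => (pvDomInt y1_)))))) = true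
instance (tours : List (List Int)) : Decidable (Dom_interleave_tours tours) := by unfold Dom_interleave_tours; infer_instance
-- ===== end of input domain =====

-- B replaces A's fused position×tour loop with a seen-set by a sort-then-scan:
-- flatten the grid row-major into (pos, tour-index, value) cells, sort by
-- (pos, tour-index), and dedup the sorted value stream (objective: alternative).

-- ===== PORT A =====
def interleave_tours (tours : List (List Int)) : List Int :=
  if tours = [] then []
  else
    let maxLen : Int :=
      (PySem.List.max? (tours.map (fun t => (t.length : Int))) (fun x => x)).getD 0
      -- getD 0 is unreachable: tours ≠ [] so max? = some _
    let st :=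
      (PySem.List.pyRange 0 maxLen).foldl
        (fun (st : List Int × PySem.Set Int) pos =>
          tours.foldl
            (fun (st : List Int × PySem.Set Int) tour =>
              if pos ≥ (tour.length : Int) then st
              else
                match PySem.List.pyGet? tour pos with
                | none => st  -- unreachable: 0 ≤ pos < len(tour)
                | some idx =>
                  if PySem.Set.contains st.2 idx then st
                  else (st.1 ++ [idx], PySem.Set.add st.2 idx)) st)
        ([], PySem.Set.empty)
    st.1

-- ===== PORT B =====
-- the row-major cell list [(pos, ti, idx) for ti, tour in enumerate(tours) for pos, idx in enumerate(tour)]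
def cellsOf (tours : List (List Int)) : List (Int × Int × Int) :=
  (PySem.List.enumerate tours).flatMap (fun p =>
    (PySem.List.enumerate p.2).map (fun q => (q.1, p.1, q.2)))

def interleave_tours_alt (tours : List (List Int)) : List Int :=
  PySem.List.dedup
    ((PySem.List.sorted2 (cellsOf tours) (fun c => c.1) (fun c => c.2.1)).map
      (fun c => c.2.2))

-- ===== PRECONDITION & SPEC =====
def Spec_interleave_tours (tours : List (List Int)) (out : List Int) : Prop := out = interleave_tours_alt tours
instance (tours : List (List Int)) (out : List Int) : Decidable (Spec_interleave_tours tours out) := by unfold Spec_interleave_tours; infer_instance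

-- ===== CLAIM (what is proved, stated in full; the proofs are below) =====
def Claim_equal_interleave_tours : Prop := ∀ (tours : List (List Int)), Dom_interleave_tours tours → Spec_interleave_tours tours (interleave_tours tours)

-- ===== LEMMAS AND PROOFS =====

-- the column of the tours at position p (elements of tours long enough, in order)
def col (ts : List (List Int)) (p : Nat) : List Int := ts.filterMap (fun t => t[p]?)

-- the keyed column at position p: (pos, tour-index, value) cells, tour order
def kcol (ts : List (List Int)) (p : Nat) : List (Int × Int × Int) :=
  (PySem.List.enumerate ts).filterMap
    (fun q => (q.2[p]?).map (fun x => ((p : Int), q.1, x)))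

-- the keyed column-major stream, n columns deep
def kstream (n : Nat) (ts : List (List Int)) : List (Int × Int × Int) :=
  (List.range n).flatMap (kcol ts)

-- the sort key of B (Python's tuple order = lexicographic)
def K (c : Int × Int × Int) : Lex (Int × Int) := toLex (c.1, c.2.1)

-- the inner loop of A at one position, on a state with out = seen, is Set.update by the column
theorem innerA (tours : List (List Int)) (p : Nat) (s : PySem.Set Int) :
    tours.foldl
      (fun (st : List Int × PySem.Set Int) tour =>
        if (p : Int) ≥ (tour.length : Int) then st
        else
          match PySem.List.pyGet? tour (p : Int) with
          | none => st
          | some idx =>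
            if PySem.Set.contains st.2 idx then st
            else (st.1 ++ [idx], PySem.Set.add st.2 idx)) (s, s)
    = (PySem.Set.update s (col tours p), PySem.Set.update s (col tours p)) := by
  induction tours generalizing s with
  | nil => rfl
  | cons t l ih =>
    rw [List.foldl_cons]
    by_cases hlen : (p : Int) ≥ (t.length : Int)
    · have hget : t[p]? = none := by
        rw [List.getElem?_eq_none_iff]
        exact_mod_cast hlen
      simp only [hlen, if_pos, col, List.filterMap_cons, hget]
      exact ih s
    · have hp : p < t.length := by exact_mod_cast not_le.mp hlen
      have hget : t[p]? = some t[p] := List.getElem?_eq_getElem hp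
      have hpy : PySem.List.pyGet? t (p : Int) = some t[p] := by
        rw [PySem.List.pyGet?_natCast, hget]
      simp only [hlen, if_false, hpy, col, List.filterMap_cons, hget]
      by_cases hc : PySem.Set.contains s t[p]
      · have hmem' : t[p] ∈ s := by simpa using hc
        have hadd : PySem.Set.add s t[p] = s := by
          simp [PySem.Set.add, hmem']
        simp only [hc, if_pos]
        have := ih s
        simp only [col] at this
        rw [this]
        simp [PySem.Set.update, hadd]
      · have hmem' : t[p] ∉ s := by simpa using hc
        simp only [hc, if_neg, Bool.false_eq_true, not_false_iff]
        have hadd : PySem.Set.add s t[p] = s ++ [t[p]] := by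
          simp [PySem.Set.add, hmem']
        have := ih (PySem.Set.add s t[p])
        simp only [col] at this
        rw [← hadd, this]
        simp [PySem.Set.update]

theorem update_foldl (l : List Nat) (ts : List (List Int)) (s : PySem.Set Int) :
    l.foldl (fun a p => PySem.Set.update a (col ts p)) s
      = PySem.Set.update s (l.flatMap (col ts)) := by
  induction l generalizing s with
  | nil => rfl
  | cons p l ih =>
    rw [List.foldl_cons, ih, List.flatMap_cons]
    simp [PySem.Set.update, List.foldl_append]

-- projecting the value out of a keyed column gives the plain column
theorem map_proj_kcol (ts : List (List Int)) (p : Nat) :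
    (kcol ts p).map (fun c => c.2.2) = col ts p := by
  unfold kcol col
  rw [List.map_filterMap]
  have h1 : ∀ q : Int × List Int,
      ((q.2[p]?).map fun x => ((p : Int), q.1, x)).map (fun c => c.2.2) = q.2[p]? := by
    intro q; cases q.2[p]? <;> rfl
  simp only [h1]
  conv_rhs => rw [show ts = (PySem.List.enumerate ts).map (fun q => q.2) from
    (PySem.List.map_snd_enumerate ts 0).symm]
  rw [List.filterMap_map]
  rfl

theorem map_proj_kstream (n : Nat) (ts : List (List Int)) :
    (kstream n ts).map (fun c => c.2.2) = (List.range n).flatMap (col ts) := by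
  unfold kstream
  rw [List.map_flatMap]
  exact List.flatMap_congr (fun p _ => map_proj_kcol ts p)

theorem fst_of_mem_kcol (ts : List (List Int)) (p : Nat) (c : Int × Int × Int)
    (h : c ∈ kcol ts p) : c.1 = (p : Int) := by
  unfold kcol at h
  obtain ⟨q, _, hq⟩ := List.mem_filterMap.mp h
  cases hx : q.2[p]? with
  | none => rw [hx] at hq; simp at hq
  | some x => rw [hx] at hq; simp at hq; rw [← hq]

-- the keyed stream is strictly increasing under B's sort key
theorem pairwise_kstream (n : Nat) (ts : List (List Int)) :
    (kstream n ts).Pairwise (fun a b => K a < K b) := by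
  unfold kstream
  rw [List.pairwise_flatMap]
  constructor
  · intro p _
    unfold kcol
    refine List.Pairwise.filterMap _ ?_ (PySem.List.pairwise_lt_enumerate ts 0)
    intro a a' hlt b hb b' hb'
    cases hx : a.2[p]? with
    | none => rw [hx] at hb; simp at hb
    | some x =>
      cases hx' : a'.2[p]? with
      | none => rw [hx'] at hb'; simp at hb'
      | some x' =>
        rw [hx] at hb; rw [hx'] at hb'
        simp at hb hb'
        rw [← hb, ← hb']
        simp [K, Prod.Lex.lt_iff]
        omega
  · have hr : (List.range n).Pairwise (· < ·) := List.pairwise_lt_range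
    refine hr.imp_of_mem ?_
    intro p q hp hq hlt x hx y hy
    have h1 := fst_of_mem_kcol ts p x hx
    have h2 := fst_of_mem_kcol ts q y hy
    simp [K, Prod.Lex.lt_iff, h1, h2]
    omega

theorem nodup_of_pairwise_klt (l : List (Int × Int × Int))
    (h : l.Pairwise (fun a b => K a < K b)) : l.Nodup :=
  h.imp (fun {a b} hab => by intro he; rw [he] at hab; exact lt_irrefl _ hab)

-- membership characterisation of the row-major cell list
theorem mem_cells_iff (ts : List (List Int)) (c : Int × Int × Int) :
    c ∈ cellsOf ts ↔ ∃ (ti pn : Nat) (h1 : ti < ts.length) (h2 : pn < ts[ti].length),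
      c = ((pn : Int), (ti : Int), ts[ti][pn]) := by
  unfold cellsOf
  rw [List.mem_flatMap]
  constructor
  · rintro ⟨p, hp, hc⟩
    obtain ⟨ti, h1, hpe⟩ := (PySem.List.mem_enumerate_iff ts 0 p).mp hp
    obtain ⟨q, hq, hqc⟩ := List.mem_map.mp hc
    obtain ⟨pn, h2, hqe⟩ := (PySem.List.mem_enumerate_iff p.2 0 q).mp hq
    subst hpe
    simp at h2 hqe
    refine ⟨ti, pn, h1, h2, ?_⟩
    rw [← hqc, hqe]
    simp
  · rintro ⟨ti, pn, h1, h2, hc⟩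
    refine ⟨((ti : Int), ts[ti]), ?_, ?_⟩
    · rw [PySem.List.mem_enumerate_iff]
      exact ⟨ti, h1, by simp⟩
    · rw [List.mem_map]
      refine ⟨((pn : Int), ts[ti][pn]), ?_, by simpa using hc.symm⟩
      rw [PySem.List.mem_enumerate_iff]
      exact ⟨pn, h2, by simp⟩

-- membership characterisation of the keyed stream (n at least every tour length)
theorem mem_kstream_iff (n : Nat) (ts : List (List Int))
    (hn : ∀ t ∈ ts, t.length ≤ n) (c : Int × Int × Int) :
    c ∈ kstream n ts ↔ ∃ (ti pn : Nat) (h1 : ti < ts.length) (h2 : pn < ts[ti].length),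
      c = ((pn : Int), (ti : Int), ts[ti][pn]) := by
  unfold kstream
  rw [List.mem_flatMap]
  constructor
  · rintro ⟨p, _, hc⟩
    unfold kcol at hc
    obtain ⟨q, hq, hqc⟩ := List.mem_filterMap.mp hc
    obtain ⟨ti, h1, hpe⟩ := (PySem.List.mem_enumerate_iff ts 0 q).mp hq
    subst hpe
    simp at hqc
    cases hx : ts[ti][p]? with
    | none => rw [hx] at hqc; simp at hqc
    | some x =>
      rw [hx] at hqc
      simp at hqc
      obtain ⟨h2, hval⟩ := List.getElem?_eq_some_iff.mp hx
      exact ⟨ti, p, h1, h2, by rw [← hqc, hval]⟩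
  · rintro ⟨ti, pn, h1, h2, hc⟩
    have hpn : pn < n := lt_of_lt_of_le h2 (hn ts[ti] (List.getElem_mem h1))
    refine ⟨pn, List.mem_range.mpr hpn, ?_⟩
    unfold kcol
    rw [List.mem_filterMap]
    refine ⟨((ti : Int), ts[ti]), ?_, ?_⟩
    · rw [PySem.List.mem_enumerate_iff]
      exact ⟨ti, h1, by simp⟩
    · simp [List.getElem?_eq_getElem h2, hc]

-- the cell list is nodup (each grid cell appears once)
theorem nodup_cells (ts : List (List Int)) : (cellsOf ts).Nodup := by
  unfold cellsOf
  have hpw : (cellsOf ts).Pairwise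
      (fun a b => a.2.1 < b.2.1 ∨ (a.2.1 = b.2.1 ∧ a.1 < b.1)) := by
    unfold cellsOf
    rw [List.pairwise_flatMap]
    constructor
    · intro p _
      rw [List.pairwise_map]
      refine (PySem.List.pairwise_lt_enumerate p.2 0).imp ?_
      intro a b hab
      right
      exact ⟨rfl, hab⟩
    · refine (PySem.List.pairwise_lt_enumerate ts 0).imp_of_mem ?_
      intro p q _ _ hlt x hx y hy
      obtain ⟨a, _, ha⟩ := List.mem_map.mp hx
      obtain ⟨b, _, hb⟩ := List.mem_map.mp hy
      left
      rw [← ha, ← hb]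
      exact hlt
  exact hpw.imp (fun {a b} hab => by
    intro he
    rw [he] at hab
    rcases hab with h | ⟨_, h⟩ <;> exact lt_irrefl _ h)

theorem perm_cells_kstream (n : Nat) (ts : List (List Int))
    (hn : ∀ t ∈ ts, t.length ≤ n) : (kstream n ts).Perm (cellsOf ts) := by
  rw [List.perm_ext_iff_of_nodup
    (nodup_of_pairwise_klt _ (pairwise_kstream n ts)) (nodup_cells ts)]
  intro c
  rw [mem_kstream_iff n ts hn c, mem_cells_iff ts c]

-- B's sorted2 comparator is exactly the lexicographic order on (pos, ti)
theorem cmp_lex (c1 c2 d1 d2 : Int) :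
    (decide (c1 < d1) || (!decide (d1 < c1) && decide (c2 < d2)))
      = decide (toLex (c1, c2) < toLex (d1, d2)) := by
  rw [Bool.eq_iff_iff]
  simp [Prod.Lex.lt_iff]
  omega

theorem sorted2_eq_sorted_K (xs : List (Int × Int × Int)) :
    PySem.List.sorted2 xs (fun c => c.1) (fun c => c.2.1)
      = PySem.List.sorted xs K := by
  unfold PySem.List.sorted2 PySem.List.sorted
  simp only [if_neg (by decide : ¬ (false = true))]
  congr 1
  funext acc x
  congr 1
  funext a b
  exact cmp_lex a.1 a.2.1 b.1 b.2.1

theorem sorted2_cells_eq_kstream (n : Nat) (ts : List (List Int))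
    (hn : ∀ t ∈ ts, t.length ≤ n) :
    PySem.List.sorted2 (cellsOf ts) (fun c => c.1) (fun c => c.2.1) = kstream n ts := by
  rw [sorted2_eq_sorted_K]
  exact PySem.List.sorted_eq_of_perm_of_pairwise_lt _ _ K
    (perm_cells_kstream n ts hn) (pairwise_kstream n ts)

-- ===== VERDICT (by name: the statement is the Claim_ definition above) =====
theorem interleave_tours_spec : Claim_equal_interleave_tours := by
  intro tours _
  unfold Spec_interleave_tours interleave_tours interleave_tours_alt
  by_cases h : tours = []
  · subst h
    rfl
  · simp only [h, if_false]
    obtain ⟨m, hm⟩ : ∃ m, PySem.List.max? (tours.map (fun t => (t.length : Int))) (fun x => x) = some m := by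
      cases hx : PySem.List.max? (tours.map (fun t => (t.length : Int))) (fun x => x) with
      | none =>
        rw [PySem.List.max?_eq_none_iff] at hx
        exact absurd (List.map_eq_nil_iff.mp hx) h
      | some m => exact ⟨m, rfl⟩
    have hmem : m ∈ tours.map (fun t => (t.length : Int)) := PySem.List.max?_mem hm
    have hm0 : 0 ≤ m := by
      obtain ⟨t, _, ht⟩ := List.mem_map.mp hmem
      omega
    have hmax : ∀ t ∈ tours, t.length ≤ m.toNat := by
      intro t ht
      have := PySem.List.max?_isMax hm ((t.length : Int)) (List.mem_map_of_mem ht)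
      omega
    rw [hm]
    simp only [Option.getD_some]
    have hrange : PySem.List.pyRange 0 m = List.map (fun k => ((k : Nat) : Int)) (List.range m.toNat) := by
      have := PySem.List.pyRange_zero_natCast m.toNat
      rwa [Int.toNat_of_nonneg hm0] at this
    rw [hrange]
    simp only [List.foldl_map]
    rw [show (([] : List Int), (PySem.Set.empty : PySem.Set Int))
          = ((PySem.Set.empty : PySem.Set Int), (PySem.Set.empty : PySem.Set Int)) from rfl]
    have houter :
        (List.range m.toNat).foldl
          (fun (st : List Int × PySem.Set Int) (p : Nat) =>
            tours.foldl
              (fun (st : List Int × PySem.Set Int) tour =>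
                if ((p : Int)) ≥ (tour.length : Int) then st
                else
                  match PySem.List.pyGet? tour ((p : Int)) with
                  | none => st
                  | some idx =>
                    if PySem.Set.contains st.2 idx then st
                    else (st.1 ++ [idx], PySem.Set.add st.2 idx)) st)
          (PySem.Set.empty, PySem.Set.empty)
        = (PySem.Set.update PySem.Set.empty ((List.range m.toNat).flatMap (col tours)),
           PySem.Set.update PySem.Set.empty ((List.range m.toNat).flatMap (col tours))) := by
      rw [← update_foldl]
      generalize (PySem.Set.empty : PySem.Set Int) = s
      induction (List.range m.toNat) generalizing s with
      | nil => rfl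
      | cons p l ihl =>
        rw [List.foldl_cons, List.foldl_cons, innerA tours p s]
        exact ihl _
    rw [houter]
    rw [sorted2_cells_eq_kstream m.toNat tours hmax, map_proj_kstream,
      PySem.List.dedup_eq_ofList, PySem.Set.ofList_eq_foldl]
    simp [PySem.Set.update, PySem.Set.empty]
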